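-- pv_equiv track=rewrite | github.com/lymchgmk/Algorithm-Problem-Solving | Progammers/코딩테스트/Coupang/1.py | solution
-- ===== SOURCE A (Python) =====
-- def X_scale(number, X):
--     q, r = divmod(number, X)
--     if q == 0:
--         return str(r)
--     else:
--         return X_scale(q, X) + str(r)
--
-- def solution(N):
--     sub_result = []
--     for i in range(2, 10):
--         sub_result.append([X_scale(N, i), i])
--
--     result = []
--     for j in range(8):
--         test = sub_result[j][0]
--         temp = 1
--         for n in test:
--             if n != 0:
--                 temp *= int(n)
--         result.append([temp, j+2])
--
--     result = sorted(result, key = lambda x : (-x[0], -x[1]))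
--     answer = [result[0][1], result[0][0]]
--
--     return answer
-- ===== SOURCE B (Python) =====
-- def digit_product(n, base):
--     prod = 1
--     while True:
--         prod *= n % base
--         n //= base
--         if n == 0:
--             return prod
--
--
-- def solution(N):
--     best_base, best_prod = 2, digit_product(N, 2)
--     for base in range(3, 10):
--         p = digit_product(N, base)
--         if p >= best_prod:
--             best_base, best_prod = base, p
--     return [best_base, best_prod]
-- ===== Notes on version B (the rewrite author's own statement) =====
-- stated objective: simpler
-- what changed: B computes each base's digit product with a direct arithmetic do-while loop (no base-representation string, no char parsing) and keeps the best base as a single online running maximum with >= replacement, instead of A's build-string/parse-digits/sort-all-eight-then-take-head pipeline.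
import Mathlib
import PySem

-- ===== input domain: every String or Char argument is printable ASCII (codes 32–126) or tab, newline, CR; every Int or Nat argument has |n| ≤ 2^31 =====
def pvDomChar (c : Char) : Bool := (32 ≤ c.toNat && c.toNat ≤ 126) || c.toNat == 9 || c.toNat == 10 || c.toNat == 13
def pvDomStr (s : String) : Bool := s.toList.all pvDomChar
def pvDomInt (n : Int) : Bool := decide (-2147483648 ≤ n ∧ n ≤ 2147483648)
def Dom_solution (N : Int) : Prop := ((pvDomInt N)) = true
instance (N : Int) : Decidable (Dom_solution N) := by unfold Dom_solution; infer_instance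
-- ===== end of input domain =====

-- B replaces A's build-base-string / parse-digit-chars / sort-eight-rows pipeline by a direct
-- arithmetic digit-product loop and an online running maximum (objective: simpler).

-- ===== PORT A =====
-- X_scale recurses on q = number // X; the Nat fuel (number.toNat + 1) is a totality guard
-- only: for number ≥ 0 and X ≥ 2 it never runs out (on negative number Python's X_scale
-- raises RecursionError, excluded by Pre_solution).
def X_scaleF : Nat → Int → Int → String
  | 0, _, _ => ""
  | fuel + 1, number, X =>
    match PySem.Int.divmod? number X with
    | none => ""
    | some (q, r) =>
      if q = 0 then PySem.Int.toStr r
      else X_scaleF fuel q X ++ PySem.Int.toStr r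
def X_scale (number X : Int) : String := X_scaleF (number.toNat + 1) number X

def solution (N : Int) : List Int :=
  let sub_result : List (String × Int) :=
    (PySem.List.pyRange 2 10 1).foldl (fun acc i => acc ++ [(X_scale N i, i)]) []
  let result : List (Int × Int) :=
    (PySem.List.pyRange 0 8 1).foldl (fun acc j =>
      let test := ((PySem.List.pyGet? sub_result j).getD ("", 0)).1
      -- `if n != 0`: n is a one-char str and 0 an int, so the Python comparison is always
      -- True and every digit (including the zeros) is multiplied in.
      let temp := test.toList.foldl
        (fun temp n => temp * ((PySem.Int.ofChars? [n]).getD 0)) 1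
      acc ++ [(temp, j + 2)]) []
  match PySem.List.sorted2 result (fun x => -x.1) (fun x => -x.2) with
  | x :: _ => [x.2, x.1]
  | [] => []

-- ===== PORT B =====
-- do-while digit-product loop; the Nat fuel (n.toNat + 1) is a totality guard only (for
-- n ≥ 0 and base ≥ 2 it never runs out; negative n is excluded by Pre_solution).
def digitProdF : Nat → Int → Int → Int → Int
  | 0, prod, _, _ => prod
  | fuel + 1, prod, n, base =>
    match PySem.Int.divmod? n base with
    | none => prod
    | some (q, r) =>
      if q = 0 then prod * r
      else digitProdF fuel (prod * r) q base
def digit_product (n base : Int) : Int := digitProdF (n.toNat + 1) 1 n base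

def solution_alt (N : Int) : List Int :=
  let s := (PySem.List.pyRange 3 10 1).foldl
    (fun s base =>
      let p := digit_product N base
      if s.2 ≤ p then (base, p) else s)
    (2, digit_product N 2)
  [s.1, s.2]

-- ===== PRECONDITION & SPEC =====
-- On N < 0 the Python A raises RecursionError (X_scale's quotient never reaches 0), so
-- those inputs are excluded; A returns normally on every N ≥ 0.
def Pre_solution (N : Int) : Prop := 0 ≤ N
instance (N : Int) : Decidable (Pre_solution N) := by unfold Pre_solution; infer_instance
def pvWitness_solution : Int := 972

def Spec_solution (N : Int) (out : List Int) : Prop := out = solution_alt N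
instance (N : Int) (out : List Int) : Decidable (Spec_solution N out) := by unfold Spec_solution; infer_instance

-- ===== CLAIM (what is proved, stated in full; the proofs are below) =====
def Claim_equal_solution : Prop := ∀ (N : Int), Dom_solution N → Pre_solution N → Spec_solution N (solution N)

-- ===== LEMMAS AND PROOFS =====

def pvMul (t : Int) (n : Char) : Int := t * ((PySem.Int.ofChars? [n]).getD 0)

lemma pvMul_foldl_factor (l : List Char) : ∀ init : Int,
    l.foldl pvMul init = init * l.foldl pvMul 1 := by
  induction l with
  | nil => intro init; simp
  | cons c t ih =>
    intro init
    simp only [List.foldl]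
    rw [ih, ih (pvMul 1 c)]
    simp [pvMul]; ring

lemma pvCharProd_toStr (r : Int) (h0 : 0 ≤ r) (h9 : r ≤ 9) (init : Int) :
    (PySem.Int.toStr r).toList.foldl pvMul init = init * r := by
  have h1 : (PySem.Int.toStr r).toList = [Char.ofNat (48 + r.toNat)] := by
    interval_cases r <;> decide
  have h2 : PySem.Int.ofChars? [Char.ofNat (48 + r.toNat)] = some r := by
    interval_cases r <;> decide
  rw [h1]
  simp [List.foldl, pvMul, h2]

lemma pv_prod_eq : ∀ (fuel : Nat) (n base init : Int), 0 ≤ n → 2 ≤ base → base ≤ 9 →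
    n.toNat < fuel →
    digitProdF fuel init n base = (X_scaleF fuel n base).toList.foldl pvMul init := by
  intro fuel
  induction fuel with
  | zero => intro n base init _ _ _ h; omega
  | succ f ih =>
    intro n base init hn hb2 hb9 hf
    have hbne : base ≠ 0 := by omega
    have hfd : n.fdiv base = n / base := by
      rw [Int.fdiv_eq_ediv]; simp [show (0:Int) ≤ base by omega]
    have hfm : n.fmod base = n % base := by
      rw [Int.fmod_eq_emod]; simp [show (0:Int) ≤ base by omega]
    simp only [digitProdF, X_scaleF, PySem.Int.divmod?, if_neg hbne, hfd, hfm]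
    have hr0 : 0 ≤ n % base := Int.emod_nonneg n hbne
    have hrb : n % base < base := Int.emod_lt_of_pos n (by omega)
    have hdm : base * (n / base) + n % base = n := Int.mul_ediv_add_emod n base
    by_cases hq : n / base = 0
    · simp only [hq, reduceIte]
      exact (pvCharProd_toStr _ hr0 (by omega) init).symm
    · have hq0 : 0 ≤ n / base := Int.ediv_nonneg hn (by omega)
      have hq1 : 1 ≤ n / base := by
        have := Int.ediv_nonneg hn (show (0:Int) ≤ base by omega); omega
      have hlt : n / base < n := by nlinarith
      simp only [if_neg hq]
      rw [ih _ _ _ hq0 hb2 hb9 (by omega)]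
      rw [String.toList_append, List.foldl_append]
      rw [pvCharProd_toStr _ hr0 (by omega)]
      rw [pvMul_foldl_factor, pvMul_foldl_factor _ init]
      ring

def pvLt (a b : Int × Int) : Bool :=
  decide ((-a.1) < (-b.1)) || (!decide ((-b.1) < (-a.1)) && decide ((-a.2) < (-b.2)))

lemma pvLt_irrefl (a : Int × Int) : pvLt a a = false := by simp [pvLt]

lemma pvLt_trans {a b c : Int × Int} (h1 : pvLt a b = true) (h2 : pvLt b c = true) :
    pvLt a c = true := by
  simp only [pvLt, Bool.or_eq_true, Bool.and_eq_true, Bool.not_eq_eq_eq_not, Bool.not_true,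
    decide_eq_true_eq, decide_eq_false_iff_not] at *
  omega

def pvHeadMin : List (Int × Int) → Prop
  | [] => True
  | m :: t => ∀ y ∈ m :: t, pvLt y m = false

lemma insertBy_headmin (x : Int × Int) (acc : List (Int × Int)) (hinv : pvHeadMin acc) :
    pvHeadMin (PySem.List.insertBy pvLt x acc) := by
  cases acc with
  | nil =>
    show pvHeadMin [x]
    intro y hy
    rcases List.mem_singleton.mp hy with rfl
    exact pvLt_irrefl y
  | cons h t =>
    show pvHeadMin (if pvLt x h then x :: h :: t else h :: PySem.List.insertBy pvLt x t)
    by_cases hc : pvLt x h = true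
    · rw [if_pos hc]
      intro y hy
      rcases List.mem_cons.mp hy with rfl | hy2
      · exact pvLt_irrefl y
      · have hyh : pvLt y h = false := hinv y hy2
        by_contra hyx
        have : pvLt y h = true :=
          pvLt_trans (by revert hyx; cases pvLt y x <;> simp) hc
        rw [this] at hyh; exact absurd hyh (by simp)
    · rw [if_neg hc]
      intro y hy
      rcases List.mem_cons.mp hy with rfl | hy2
      · exact pvLt_irrefl y
      · rcases (PySem.List.mem_insertBy pvLt x y t).mp hy2 with rfl | hy3
        · exact Bool.eq_false_iff.mpr (fun hh => hc hh)
        · exact hinv y (List.mem_cons_of_mem _ hy3)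

lemma foldl_insertBy_headmin (xs : List (Int × Int)) :
    ∀ acc, pvHeadMin acc →
      pvHeadMin (xs.foldl (fun acc x => PySem.List.insertBy pvLt x acc) acc) := by
  induction xs with
  | nil => intro acc h; exact h
  | cons x t ih => intro acc h; exact ih _ (insertBy_headmin x acc h)

lemma sorted2_headmin (xs : List (Int × Int)) {m : Int × Int} {t : List (Int × Int)}
    (h : PySem.List.sorted2 xs (fun x => -x.1) (fun x => -x.2) = m :: t) :
    ∀ y ∈ xs, pvLt y m = false := by
  intro y hy
  have hfold : PySem.List.sorted2 xs (fun x => -x.1) (fun x => -x.2) =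
      xs.foldl (fun acc x => PySem.List.insertBy pvLt x acc) [] := rfl
  have hinv := foldl_insertBy_headmin xs [] trivial
  rw [← hfold, h] at hinv
  have hymem : y ∈ m :: t := by
    rw [← h]
    exact ((PySem.List.sorted2_perm xs _ _ false).mem_iff).mpr hy
  exact hinv y hymem

-- B's online maximum over an increasing base list: where it ends up
lemma pv_fold_best (P : Int → Int) :
    ∀ (bs done : List Int) (s : Int × Int),
      s.2 = P s.1 → s.1 ∈ done →
      (∀ d ∈ done, P d ≤ s.2 ∧ (s.1 < d → P d < s.2)) →
      (∀ d ∈ done, ∀ b ∈ bs, d < b) →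
      bs.Pairwise (· < ·) →
      (let t := bs.foldl (fun s base => if s.2 ≤ P base then (base, P base) else s) s
       t.2 = P t.1 ∧ t.1 ∈ done ++ bs ∧
         ∀ d ∈ done ++ bs, P d ≤ t.2 ∧ (t.1 < d → P d < t.2)) := by
  intro bs
  induction bs with
  | nil =>
    intro done s h1 h2 h3 _ _
    exact ⟨h1, by simpa using h2, by simpa using h3⟩
  | cons b rest ih =>
    intro done s h1 h2 h3 hcross hpw
    have hpw' : rest.Pairwise (· < ·) := hpw.tail
    have hbrest : ∀ r ∈ rest, b < r := fun r hr => List.rel_of_pairwise_cons hpw hr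
    simp only [List.foldl_cons]
    by_cases hc : s.2 ≤ P b
    · rw [if_pos hc]
      have h := ih (done ++ [b]) (b, P b) rfl (by simp)
        (by
          intro d hd
          rcases List.mem_append.mp hd with hd1 | hd2
          · have := h3 d hd1
            have hdb : d < b := hcross d hd1 b (List.mem_cons_self)
            exact ⟨by simp; omega, by simp; omega⟩
          · rcases List.mem_singleton.mp hd2 with rfl
            simp)
        (by
          intro d hd r hr
          rcases List.mem_append.mp hd with hd1 | hd2
          · exact hcross d hd1 r (List.mem_cons_of_mem _ hr)
          · rcases List.mem_singleton.mp hd2 with rfl; exact hbrest r hr)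
        hpw'
      simpa [List.append_assoc] using h
    · rw [if_neg hc]
      have h := ih (done ++ [b]) s h1 (by simp [h2])
        (by
          intro d hd
          rcases List.mem_append.mp hd with hd1 | hd2
          · exact h3 d hd1
          · rcases List.mem_singleton.mp hd2 with rfl
            constructor <;> omega)
        (by
          intro d hd r hr
          rcases List.mem_append.mp hd with hd1 | hd2
          · exact hcross d hd1 r (List.mem_cons_of_mem _ hr)
          · rcases List.mem_singleton.mp hd2 with rfl; exact hbrest r hr)
        hpw'
      simpa [List.append_assoc] using h

lemma pvLt_false {a b : Int × Int} (h : pvLt a b = false) :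
    a.1 ≤ b.1 ∧ (b.1 ≤ a.1 → a.2 ≤ b.2) := by
  simp only [pvLt, Bool.or_eq_false_iff, Bool.and_eq_false_iff, Bool.not_eq_eq_eq_not,
    Bool.not_false, decide_eq_true_eq, decide_eq_false_iff_not] at h
  omega

lemma pv_digit (N b : Int) (hN : 0 ≤ N) (h2 : 2 ≤ b) (h9 : b ≤ 9) :
    (X_scale N b).toList.foldl pvMul 1 = digit_product N b :=
  (pv_prod_eq (N.toNat + 1) N b 1 hN h2 h9 (Nat.lt_succ_self _)).symm

theorem pv_main (N : Int) (hN : 0 ≤ N) : solution N = solution_alt N := by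
  have hr1 : PySem.List.pyRange 2 10 1 = [2,3,4,5,6,7,8,9] := by decide
  have hr2 : PySem.List.pyRange 0 8 1 = [0,1,2,3,4,5,6,7] := by decide
  have hr3 : PySem.List.pyRange 3 10 1 = [3,4,5,6,7,8,9] := by decide
  have hmul : (fun (temp : Int) (n : Char) => temp * ((PySem.Int.ofChars? [n]).getD 0)) = pvMul := rfl
  set P : Int → Int := digit_product N with hP
  -- A's result list
  have hA : solution N =
      (match PySem.List.sorted2
          [(P 2, 2), (P 3, 3), (P 4, 4), (P 5, 5), (P 6, 6), (P 7, 7), (P 8, 8), (P 9, 9)]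
          (fun x => -x.1) (fun x => -x.2) with
        | x :: _ => [x.2, x.1]
        | [] => []) := by
    simp only [solution, hr1, hr2, List.foldl_cons, List.foldl_nil, List.nil_append,
      List.cons_append, hmul, PySem.List.pyGet?, PySem.List.pyIdx?]
    rw [show Int.toNat 2 = 2 from rfl, show Int.toNat 3 = 3 from rfl,
      show Int.toNat 4 = 4 from rfl, show Int.toNat 5 = 5 from rfl,
      show Int.toNat 6 = 6 from rfl, show Int.toNat 7 = 7 from rfl]
    norm_num [pv_digit N _ hN]
    rfl
  -- B side
  have hlam : (fun (s : Int × Int) (base : Int) =>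
      let p := digit_product N base
      if s.2 ≤ p then (base, p) else s) =
      (fun (s : Int × Int) (base : Int) => if s.2 ≤ P base then (base, P base) else s) := rfl
  have hB : solution_alt N =
      [([3,4,5,6,7,8,9].foldl (fun (s : Int × Int) (base : Int) =>
          if s.2 ≤ P base then (base, P base) else s) (2, P 2)).1,
       ([3,4,5,6,7,8,9].foldl (fun (s : Int × Int) (base : Int) =>
          if s.2 ≤ P base then (base, P base) else s) (2, P 2)).2] := by
    simp only [solution_alt, hr3, hlam]
    rfl
  obtain ⟨hs2, hs1mem, hsmax⟩ := pv_fold_best P [3,4,5,6,7,8,9] [2] (2, P 2) rfl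
    (by simp)
    (by intro d hd; rcases List.mem_singleton.mp hd with rfl; exact ⟨le_refl _, by omega⟩)
    (by intro d hd b hb; rcases List.mem_singleton.mp hd with rfl;
        simp only [List.mem_cons, List.not_mem_nil, or_false] at hb; omega)
    (by decide)
  set s : Int × Int := [3,4,5,6,7,8,9].foldl (fun (s : Int × Int) (base : Int) =>
      if s.2 ≤ P base then (base, P base) else s) (2, P 2) with hsdef
  have hs1mem' : s.1 ∈ ([2,3,4,5,6,7,8,9] : List Int) := by simpa using hs1mem
  -- A side
  cases hsort : PySem.List.sorted2
      [(P 2, 2), (P 3, 3), (P 4, 4), (P 5, 5), (P 6, 6), (P 7, 7), (P 8, 8), (P 9, 9)]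
      (fun x => -x.1) (fun x => -x.2) with
  | nil =>
    have := (PySem.List.sorted2_perm
      [(P 2, 2), (P 3, 3), (P 4, 4), (P 5, 5), (P 6, 6), (P 7, 7), (P 8, 8), (P 9, 9)]
      (fun x => -x.1) (fun x => -x.2) false).length_eq
    rw [hsort] at this
    simp at this
  | cons m t =>
    rw [hA, hsort, hB]
    show [m.2, m.1] = [s.1, s.2]
    have hmin := sorted2_headmin _ hsort
    have hmem : m ∈ [(P 2, 2), (P 3, 3), (P 4, 4), (P 5, 5), (P 6, 6), (P 7, 7), (P 8, 8), (P 9, 9)] :=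
      ((PySem.List.sorted2_perm _ _ _ false).mem_iff).mp (by rw [hsort]; exact List.mem_cons_self)
    have hm12 : m.1 = P m.2 ∧ m.2 ∈ ([2,3,4,5,6,7,8,9] : List Int) := by
      simp only [List.mem_cons, List.not_mem_nil, or_false] at hmem
      rcases hmem with rfl|rfl|rfl|rfl|rfl|rfl|rfl|rfl <;> exact ⟨rfl, by simp⟩
    have hy : (P s.1, s.1) ∈
        [(P 2, 2), (P 3, 3), (P 4, 4), (P 5, 5), (P 6, 6), (P 7, 7), (P 8, 8), (P 9, 9)] := by
      simp only [List.mem_cons, List.not_mem_nil, or_false] at hs1mem' ⊢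
      rcases hs1mem' with h|h|h|h|h|h|h|h <;> rw [h] <;> simp
    have h1 := pvLt_false (hmin _ hy)
    have h2 := hsmax m.2 (by simpa using hm12.2)
    have hm1 := hm12.1
    have : m.2 = s.1 ∧ m.1 = s.2 := by
      simp only [] at h1 h2
      omega
    rw [this.1, this.2]

-- ===== VERDICT (by name: the statement is the Claim_ definition above) =====
theorem solution_spec : Claim_equal_solution := by
  intro N _ hPre
  unfold Spec_solution
  exact pv_main N hPre
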